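-- pv_equiv track=rewrite | github.com/bc36/leetcode | lc_Python/lc2100_2199.py | kIncreasing
-- ===== SOURCE A (Python) =====
-- import bisect, collections, functools, math, itertools, heapq
-- from typing import List, Optional
--
-- def kIncreasing(arr: List[int], k: int) -> int:
--     def LIS(nums: List[int]) -> int:
--         a = []
--         for v in nums:
--             pos = bisect.bisect_right(a, v)
--             if pos == len(a):
--                 a.append(v)
--             else:
--                 a[pos] = v
--         return len(a)
--
--     ans = 0
--     for i in range(k):
--         group = []
--         for x in range(i, len(arr), k):
--             group.append(arr[x])
--         ans += len(group) - LIS(group)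
--     return ans
-- ===== SOURCE B (Python) =====
-- def kIncreasing(arr, k):
--     # Partition arr into its k stride groups in one enumerate pass, then for each
--     # group compute the longest non-decreasing subsequence with an O(n^2) DP table
--     # (dp[i] = 1 + best dp[j] over j < i with g[j] <= g[i]) instead of patience
--     # sorting with bisect; answer = total elements minus total kept.
--     groups = [[] for _ in range(k)]
--     for i, v in enumerate(arr):
--         groups[i % k].append(v)
--     ans = 0
--     for g in groups:
--         dp = []
--         for v in g:
--             best = 0
--             for x, d in zip(g, dp):
--                 if x <= v and d > best:
--                     best = d
--             dp.append(best + 1)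
--         ans += len(g) - (max(dp) if dp else 0)
--     return ans
-- ===== Notes on version B (the rewrite author's own statement) =====
-- stated objective: alternative
-- what changed: B replaces A's patience-sorting LIS (tails array maintained with bisect_right) by an O(n^2) dynamic-programming table per group (dp[i] = 1 + max dp[j] over earlier j with g[j] <= g[i]), and builds the k stride groups in one enumerate pass instead of k index scans.
-- outside the precondition, e.g. on kIncreasing([1], 0): A returns 0, B raises ZeroDivisionError; on kIncreasing([1], -2): A returns 0, B raises IndexError
import Mathlib
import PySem

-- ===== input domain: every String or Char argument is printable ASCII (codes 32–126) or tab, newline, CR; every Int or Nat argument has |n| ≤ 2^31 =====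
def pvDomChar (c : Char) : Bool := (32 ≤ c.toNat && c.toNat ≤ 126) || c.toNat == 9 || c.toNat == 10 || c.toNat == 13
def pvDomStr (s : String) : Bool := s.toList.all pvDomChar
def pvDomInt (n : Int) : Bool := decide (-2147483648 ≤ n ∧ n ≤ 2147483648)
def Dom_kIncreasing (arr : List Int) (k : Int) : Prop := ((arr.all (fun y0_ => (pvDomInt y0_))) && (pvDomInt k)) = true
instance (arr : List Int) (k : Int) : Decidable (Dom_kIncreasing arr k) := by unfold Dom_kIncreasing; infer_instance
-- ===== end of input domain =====

-- B replaces A's patience-sorting LIS (bisect_right on a tails array) by an O(n^2)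
-- DP table per stride group, and builds the k groups in one enumerate pass.

-- ===== PORT A =====
-- bisect.bisect_right, ported as the actual binary search it performs
def pvBisectGo (a : List Int) (v : Int) (lo hi : Nat) : Nat :=
  if h : lo < hi then
    if v < a.getD ((lo + hi) / 2) 0 then pvBisectGo a v lo ((lo + hi) / 2)
    else pvBisectGo a v ((lo + hi) / 2 + 1) hi
  else lo
termination_by hi - lo
decreasing_by all_goals omega

def pvBisectRight (a : List Int) (v : Int) : Nat := pvBisectGo a v 0 a.length

-- the patience-update loop body of A's local helper LIS
def pvLisStep (a : List Int) (v : Int) : List Int :=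
  let pos := pvBisectRight a v
  if pos = a.length then a ++ [v] else a.set pos v

-- A's local helper LIS
def pvLIS (nums : List Int) : Nat := (nums.foldl (fun a v => pvLisStep a v) []).length

-- the indices produced by the inner range are always in bounds, so pyGetD's default is never used
def kIncreasing (arr : List Int) (k : Int) : Int :=
  (PySem.List.pyRange 0 k 1).foldl (fun ans i =>
    let group := (PySem.List.pyRange i (arr.length : Int) k).foldl
        (fun g x => g ++ [PySem.List.pyGetD arr x 0]) []
    ans + ((group.length : Int) - (pvLIS group : Int))) 0

-- ===== PORT B =====
-- B's inner loop: best = max dp[j] over already-seen x = group[j] with x <= v (0 if none);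
-- zip(group, dp) truncates to the processed prefix, exactly as in Source B
def pvBest (p dp : List Int) (v : Int) : Int :=
  (p.zip dp).foldl (fun b xd => if xd.1 ≤ v ∧ b < xd.2 then xd.2 else b) 0

def kIncreasing_alt (arr : List Int) (k : Int) : Int :=
  let groups0 := (PySem.List.pyRange 0 k 1).map (fun _ => ([] : List Int))
  let groups := (arr.foldl (fun (p : List (List Int) × Nat) v =>
      let j := (PySem.Int.mod (p.2 : Int) k).toNat
      (p.1.set j (p.1.getD j [] ++ [v]), p.2 + 1)) (groups0, 0)).1
  groups.foldl (fun ans g =>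
    let dp := g.foldl (fun dp v => dp ++ [pvBest g dp v + 1]) ([] : List Int)
    ans + ((g.length : Int) - (PySem.List.max? dp (fun y => y)).getD 0)) 0

-- ===== PRECONDITION & SPEC =====
-- Pre_ excludes k ≤ 0, outside the problem's stated domain 1 ≤ k ≤ len(arr): there A's
-- range(k) loop accidentally returns 0 while B's i % k bucketing raises
-- (ZeroDivisionError / IndexError) on any nonempty arr.
def Pre_kIncreasing (arr : List Int) (k : Int) : Prop := 1 ≤ k
instance (arr : List Int) (k : Int) : Decidable (Pre_kIncreasing arr k) := by unfold Pre_kIncreasing; infer_instance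
def pvWitness_kIncreasing : List Int × Int := ([5, 4, 3, 2, 1], 2)

def Spec_kIncreasing (arr : List Int) (k : Int) (out : Int) : Prop := out = kIncreasing_alt arr k
instance (arr : List Int) (k : Int) (out : Int) : Decidable (Spec_kIncreasing arr k out) := by unfold Spec_kIncreasing; infer_instance

-- ===== CLAIM (what is proved, stated in full; the proofs are below) =====
def Claim_equal_kIncreasing : Prop := ∀ (arr : List Int) (k : Int), Dom_kIncreasing arr k → Pre_kIncreasing arr k → Spec_kIncreasing arr k (kIncreasing arr k)

-- ===== LEMMAS AND PROOFS =====

-- the stride-k group of arr starting at offset j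
def pvGrp (K : Nat) : Nat → List Int → List Int
  | _, [] => []
  | 0, v :: r => v :: pvGrp K (K - 1) r
  | j + 1, _ :: r => pvGrp K j r

theorem pvRange_shift (a b s : Int) (hs : 0 < s) :
    PySem.List.pyRange (a + 1) (b + 1) s = (PySem.List.pyRange a b s).map (· + 1) := by
  rw [PySem.List.pyRange_of_pos _ _ hs, PySem.List.pyRange_of_pos _ _ hs, List.map_map]
  have h2 : b + 1 - (a + 1) + s - 1 = b - a + s - 1 := by ring
  simp only [add_lt_add_iff_right, h2]
  apply List.map_congr_left
  intro x _
  simp [Function.comp]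
  ring

theorem pvRange_pos_cons (a b s : Int) (hs : 0 < s) (hab : a < b) :
    PySem.List.pyRange a b s = a :: PySem.List.pyRange (a + s) b s := by
  rw [PySem.List.pyRange_of_pos _ _ hs, PySem.List.pyRange_of_pos _ _ hs]
  have hsne : s ≠ 0 := by omega
  have hdiv : (b - a + s - 1) / s = (b - a - 1) / s + 1 := by
    have : b - a + s - 1 = (b - a - 1) + 1 * s := by ring
    rw [this, Int.add_mul_ediv_right _ _ hsne]
  by_cases hc : a + s < b
  · have hcount : ((b - a + s - 1) / s).toNat = ((b - (a + s) + s - 1) / s).toNat + 1 := by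
      have h3 : b - (a + s) + s - 1 = b - a - 1 := by ring
      rw [h3, hdiv]
      have hnn : 0 ≤ (b - a - 1) / s := Int.ediv_nonneg (by omega) (by omega)
      omega
    simp only [if_pos hab, if_pos hc, hcount, List.range_succ_eq_map, List.map_cons, List.map_map]
    congr 1
    · push_cast; ring
    · apply List.map_congr_left
      intro x _
      simp [Function.comp, Nat.succ_eq_add_one]
      ring
  · have hz : (b - a - 1) / s = 0 := by
      apply Int.ediv_eq_zero_of_lt (by omega) (by omega)
    have hcount : ((b - a + s - 1) / s).toNat = 1 := by rw [hdiv, hz]; rfl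
    simp only [if_pos hab, if_neg hc, hcount]
    norm_num

theorem pvGetD_succ (v : Int) (r : List Int) (x : Int) (hx : 0 ≤ x) :
    PySem.List.pyGetD (v :: r) (x + 1) 0 = PySem.List.pyGetD r x 0 := by
  rw [PySem.List.pyGetD_of_nonneg _ _ (by omega), PySem.List.pyGetD_of_nonneg _ _ hx]
  have : (x + 1).toNat = x.toNat + 1 := by omega
  rw [this]
  rfl

-- A's group-building loop collects exactly the stride-k group
theorem pvG1 (k : Int) (hk : 1 ≤ k) (arr : List Int) (j : Nat) :
    (PySem.List.pyRange (j : Int) (arr.length : Int) k).map (fun x => PySem.List.pyGetD arr x 0)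
      = pvGrp k.toNat j arr := by
  induction arr generalizing j with
  | nil =>
    rw [PySem.List.pyRange_of_pos _ _ (by omega : (0:Int) < k)]
    have : ¬ ((j : Int) < (([] : List Int).length : Int)) := by simp
    simp [pvGrp]
  | cons v r ih =>
    have hlen : (((v :: r).length : Nat) : Int) = (r.length : Int) + 1 := by
      simp [List.length_cons]
    cases j with
    | zero =>
      rw [Int.natCast_zero, hlen,
        pvRange_pos_cons 0 ((r.length : Int) + 1) k (by omega) (by positivity),
        show (0 : Int) + k = (k - 1) + 1 by ring,
        pvRange_shift (k - 1) (r.length : Int) k (by omega)]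
      simp only [List.map_cons, List.map_map]
      have hhead : PySem.List.pyGetD (v :: r) 0 0 = v := by
        rw [PySem.List.pyGetD_of_nonneg _ _ (by omega)]; rfl
      have htail : ∀ x ∈ PySem.List.pyRange (k - 1) (r.length : Int) k,
          ((fun x => PySem.List.pyGetD (v :: r) x 0) ∘ (· + 1)) x = PySem.List.pyGetD r x 0 := by
        intro x hx
        have := (PySem.List.mem_pyRange_iff_of_pos (by omega : (0:Int) < k) x).1 hx
        exact pvGetD_succ v r x (by omega)
      rw [List.map_congr_left htail]
      have hcast : ((k.toNat - 1 : Nat) : Int) = k - 1 := by omega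
      rw [← hcast, ih (k.toNat - 1), hhead]
      rw [show pvGrp k.toNat 0 (v :: r) = v :: pvGrp k.toNat (k.toNat - 1) r from rfl]
    | succ j' =>
      have hc : ((j' + 1 : Nat) : Int) = (j' : Int) + 1 := by push_cast; ring
      rw [hc, hlen, pvRange_shift (j' : Int) (r.length : Int) k (by omega), List.map_map]
      have htail : ∀ x ∈ PySem.List.pyRange (j' : Int) (r.length : Int) k,
          ((fun x => PySem.List.pyGetD (v :: r) x 0) ∘ (· + 1)) x = PySem.List.pyGetD r x 0 := by
        intro x hx
        have := (PySem.List.mem_pyRange_iff_of_pos (by omega : (0:Int) < k) x).1 hx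
        exact pvGetD_succ v r x (by omega)
      rw [List.map_congr_left htail, ih j']
      rfl

theorem pvModNe (K m d : Nat) (hK : 0 < K) (hd0 : 0 < d) (hdK : d < K) : (m + d) % K ≠ m % K := by
  have h1 : (m + d) % K = (m % K + d) % K := by rw [Nat.add_mod, Nat.mod_eq_of_lt hdK]
  have ha : m % K < K := Nat.mod_lt _ hK
  by_cases hlt : m % K + d < K
  · rw [h1, Nat.mod_eq_of_lt hlt]; omega
  · rw [h1, Nat.mod_eq_sub_mod (by omega), Nat.mod_eq_of_lt (by omega)]; omega

-- the i % k bucket pass, for an arbitrary per-bucket update f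
theorem pvG2 (k : Int) (hk : 1 ≤ k) (f : List Int → Int → List Int) (arr : List Int) :
    ∀ (m : Nat) (ts : List (List Int)), ts.length = k.toNat →
    (arr.foldl (fun (p : List (List Int) × Nat) v =>
        let j := (PySem.Int.mod (p.2 : Int) k).toNat
        (p.1.set j (f (p.1.getD j []) v), p.2 + 1)) (ts, m)).1.length = k.toNat ∧
    ∀ d, d < k.toNat →
      (arr.foldl (fun (p : List (List Int) × Nat) v =>
        let j := (PySem.Int.mod (p.2 : Int) k).toNat
        (p.1.set j (f (p.1.getD j []) v), p.2 + 1)) (ts, m)).1.getD ((m + d) % k.toNat) []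
      = (pvGrp k.toNat d arr).foldl f (ts.getD ((m + d) % k.toNat) []) := by
  induction arr with
  | nil =>
    intro m ts hts
    refine ⟨hts, ?_⟩
    intro d hd
    simp [pvGrp]
  | cons v r ih =>
    intro m ts hts
    have hK : 0 < k.toNat := by omega
    have hkK : ((k.toNat : Nat) : Int) = k := by omega
    have hmod : (PySem.Int.mod (m : Int) k).toNat = m % k.toNat := by
      rw [← hkK, PySem.Int.mod_natCast]
      exact Int.toNat_natCast _
    set ts' := ts.set (m % k.toNat) (f (ts.getD (m % k.toNat) []) v) with hts'
    have hlen' : ts'.length = k.toNat := by rw [hts', List.length_set, hts]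
    have hstep : (List.foldl (fun (p : List (List Int) × Nat) v =>
        let j := (PySem.Int.mod (p.2 : Int) k).toNat
        (p.1.set j (f (p.1.getD j []) v), p.2 + 1)) (ts, m) (v :: r))
      = (List.foldl (fun (p : List (List Int) × Nat) v =>
        let j := (PySem.Int.mod (p.2 : Int) k).toNat
        (p.1.set j (f (p.1.getD j []) v), p.2 + 1)) (ts', m + 1) r) := by
      simp only [List.foldl_cons, hmod]
      rw [hts']
    refine ⟨by rw [hstep]; exact (ih (m + 1) ts' hlen').1, ?_⟩
    intro d hd
    rw [hstep]
    rcases Nat.eq_zero_or_pos d with hd0 | hd0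
    · subst hd0
      have hidx : (m + 1 + (k.toNat - 1)) % k.toNat = (m + 0) % k.toNat := by
        have : m + 1 + (k.toNat - 1) = m + k.toNat := by omega
        rw [this, Nat.add_mod_right, Nat.add_zero]
      have h2 := (ih (m + 1) ts' hlen').2 (k.toNat - 1) (by omega)
      rw [hidx] at h2
      rw [h2]
      have hget : ts'.getD ((m + 0) % k.toNat) [] = f (ts.getD ((m + 0) % k.toNat) []) v := by
        rw [hts', List.getD_eq_getElem?_getD, Nat.add_zero,
          List.getElem?_set_self (by rw [hts]; exact Nat.mod_lt _ hK)]
        rfl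
      rw [hget]
      rw [show pvGrp k.toNat 0 (v :: r) = v :: pvGrp k.toNat (k.toNat - 1) r from rfl]
      rfl
    · obtain ⟨e, rfl⟩ : ∃ e, d = e + 1 := ⟨d - 1, by omega⟩
      have h2 := (ih (m + 1) ts' hlen').2 e (by omega)
      have hidx : (m + 1 + e) % k.toNat = (m + (e + 1)) % k.toNat := by
        congr 1; omega
      rw [hidx] at h2
      rw [h2]
      have hne : (m + (e + 1)) % k.toNat ≠ m % k.toNat := pvModNe _ _ _ hK (by omega) hd
      have hget : ts'.getD ((m + (e + 1)) % k.toNat) [] = ts.getD ((m + (e + 1)) % k.toNat) [] := by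
        rw [hts', List.getD_eq_getElem?_getD, List.getElem?_set_ne (by omega), ← List.getD_eq_getElem?_getD]
      rw [hget]
      rfl

theorem pvMapConstGetD (l : List Int) (d : Nat) :
    (l.map (fun _ => ([] : List Int))).getD d [] = [] := by
  rw [List.getD_eq_getElem?_getD, List.getElem?_map]
  cases l[d]? <;> rfl

-- ---------- the DP table as a function of the processed prefix ----------
def pvDpStep (s : List Int × List Int) (v : Int) : List Int × List Int :=
  (s.1 ++ [v], s.2 ++ [pvBest s.1 s.2 v + 1])

def pvDpState (g : List Int) : List Int × List Int := g.foldl pvDpStep ([], [])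

theorem pvDpState_snoc (p : List Int) (w : Int) :
    pvDpState (p ++ [w]) = pvDpStep (pvDpState p) w := by
  unfold pvDpState
  rw [List.foldl_append]
  rfl

theorem pvDpState_fst (g : List Int) : (pvDpState g).1 = g ∧ (pvDpState g).2.length = g.length := by
  induction g using List.reverseRecOn with
  | nil => exact ⟨rfl, rfl⟩
  | append_singleton p w ih =>
    rw [pvDpState_snoc]
    unfold pvDpStep
    constructor
    · rw [ih.1]
    · simp [ih.2]

theorem pvZipTrunc {α β : Type} (p : List α) (rest : List α) (dp : List β)
    (h : dp.length ≤ p.length) : (p ++ rest).zip dp = p.zip dp := by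
  induction p generalizing dp with
  | nil =>
    have : dp = [] := by
      cases dp with
      | nil => rfl
      | cons a b => simp at h
    simp [this]
  | cons a p' ih =>
    cases dp with
    | nil => simp
    | cons b dp' =>
      simp only [List.cons_append, List.zip_cons_cons, List.cons.injEq, true_and]
      exact ih dp' (by simpa using h)

-- B's inline dp fold equals the prefix-indexed DP table
theorem pvDpPortAux (rest : List Int) : ∀ (p : List Int),
    List.foldl (fun dp v => dp ++ [pvBest (p ++ rest) dp v + 1]) (pvDpState p).2 rest
      = (pvDpState (p ++ rest)).2 := by
  induction rest with
  | nil => intro p; simp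
  | cons v vs ih =>
    intro p
    rw [List.foldl_cons]
    have hb : pvBest (p ++ v :: vs) (pvDpState p).2 v = pvBest p (pvDpState p).2 v := by
      unfold pvBest
      rw [pvZipTrunc p (v :: vs) (pvDpState p).2 (le_of_eq (pvDpState_fst p).2)]
    rw [hb]
    have hstate : (pvDpState p).2 ++ [pvBest p (pvDpState p).2 v + 1] = (pvDpState (p ++ [v])).2 := by
      rw [pvDpState_snoc]
      unfold pvDpStep
      rw [(pvDpState_fst p).1]
    rw [hstate]
    have := ih (p ++ [v])
    rw [List.append_assoc] at this
    simpa using this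

theorem pvDpPort (g : List Int) :
    g.foldl (fun dp v => dp ++ [pvBest g dp v + 1]) [] = (pvDpState g).2 := by
  have := pvDpPortAux g []
  simpa [pvDpState] using this

-- ---------- bisect_right on a sorted list finds the ≤-prefix length ----------
theorem pvSortedGetD (a : List Int) (h : a.Pairwise (· ≤ ·)) (i j : Nat)
    (hij : i ≤ j) (hj : j < a.length) : a.getD i 0 ≤ a.getD j 0 := by
  rcases Nat.eq_or_lt_of_le hij with rfl | hlt
  · exact le_refl _
  · rw [List.getD_eq_getElem?_getD, List.getD_eq_getElem?_getD,
      List.getElem?_eq_getElem (by omega), List.getElem?_eq_getElem hj]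
    exact (List.pairwise_iff_getElem.1 h) i j (by omega) hj hlt

theorem pvTakeWhileLen (a : List Int) (p : Int → Bool) (n : Nat) (hn : n ≤ a.length)
    (h1 : ∀ i, i < n → p (a.getD i 0) = true)
    (h2 : ∀ i, n ≤ i → i < a.length → p (a.getD i 0) = false) :
    (a.takeWhile p).length = n := by
  induction a generalizing n with
  | nil =>
    simp only [List.length_nil, Nat.le_zero] at hn
    simp [hn]
  | cons x xs ih =>
    cases n with
    | zero =>
      have := h2 0 (by omega) (by simp)
      simp only [List.getD_cons_zero] at this
      simp [this]
    | succ m =>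
      have hx := h1 0 (by omega)
      simp only [List.getD_cons_zero] at hx
      rw [List.takeWhile_cons, if_pos hx]
      simp only [List.length_cons, Nat.add_left_inj]
      apply ih m (by simpa using hn)
      · intro i hi
        have := h1 (i + 1) (by omega)
        simpa using this
      · intro i hi hilen
        have := h2 (i + 1) (by omega) (by simpa using hilen)
        simpa using this

theorem pvBisectGo_eq (a : List Int) (w : Int) (h : a.Pairwise (· ≤ ·)) :
    ∀ (n lo hi : Nat), hi - lo ≤ n → lo ≤ hi → hi ≤ a.length →
    (∀ i, i < lo → a.getD i 0 ≤ w) → (∀ i, hi ≤ i → i < a.length → w < a.getD i 0) →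
    pvBisectGo a w lo hi = (a.takeWhile (fun x => decide (x ≤ w))).length := by
  intro n
  induction n with
  | zero =>
    intro lo hi hfuel hlohi hhi hlow hhiw
    have : lo = hi := by omega
    subst this
    rw [pvBisectGo, dif_neg (by omega)]
    refine (pvTakeWhileLen a _ lo (by omega) ?_ ?_).symm
    · intro i hi2
      simpa using hlow i hi2
    · intro i hi2 hi3
      simpa using hhiw i hi2 hi3
  | succ n ih =>
    intro lo hi hfuel hlohi hhi hlow hhiw
    by_cases hlt : lo < hi
    · rw [pvBisectGo, dif_pos hlt]
      set mid := (lo + hi) / 2 with hmid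
      have hmlt : mid < hi := by omega
      have hmlen : mid < a.length := by omega
      by_cases hcmp : w < a.getD mid 0
      · rw [if_pos hcmp]
        apply ih lo mid (by omega) (by omega) (by omega) hlow
        intro i hi2 hi3
        exact lt_of_lt_of_le hcmp (pvSortedGetD a h mid i hi2 hi3)
      · rw [if_neg hcmp]
        apply ih (mid + 1) hi (by omega) (by omega) hhi
        · intro i hi2
          rcases Nat.lt_or_ge i lo with hc | hc
          · exact hlow i hc
          · exact le_trans (pvSortedGetD a h i mid (by omega) hmlen) (by omega)
        · exact hhiw
    · rw [pvBisectGo, dif_neg hlt]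
      have : lo = hi := by omega
      subst this
      refine (pvTakeWhileLen a _ lo (by omega) ?_ ?_).symm
      · intro i hi2
        simpa using hlow i hi2
      · intro i hi2 hi3
        simpa using hhiw i hi2 hi3

theorem pvBisectRight_eq (a : List Int) (w : Int) (h : a.Pairwise (· ≤ ·)) :
    pvBisectRight a w = (a.takeWhile (fun x => decide (x ≤ w))).length := by
  apply pvBisectGo_eq a w h a.length 0 a.length (by omega) (by omega) (le_refl _)
  · intro i hi; omega
  · intro i hi hlen; omega

-- for a sorted list, count of (≤ w) = length of the (≤ w) prefix
theorem pvCountP_takeWhile (a : List Int) (w : Int) (h : a.Pairwise (· ≤ ·)) :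
    a.countP (fun x => decide (x ≤ w)) = (a.takeWhile (fun x => decide (x ≤ w))).length := by
  induction a with
  | nil => rfl
  | cons x xs ih =>
    rw [List.pairwise_cons] at h
    by_cases hx : x ≤ w
    · rw [List.countP_cons, List.takeWhile_cons, if_pos (by simpa using hx), ih h.2]
      simp [hx]
    · rw [List.countP_cons, List.takeWhile_cons, if_neg (by simpa using hx)]
      have hz : xs.countP (fun x => decide (x ≤ w)) = 0 := by
        rw [List.countP_eq_zero]
        intro y hy
        simp only [decide_eq_true_eq]
        have := h.1 y hy
        omega
      simp [hz, hx]

theorem pvMaxD_append (dp : List Int) (x : Int) (hx : 0 ≤ x) :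
    (PySem.List.max? (dp ++ [x]) (fun y => y)).getD 0
      = max ((PySem.List.max? dp (fun y => y)).getD 0) x := by
  have hnil : PySem.List.max? ([] : List Int) (fun y => y) = none := by
    rw [PySem.List.max?_eq_none_iff]
  cases dp with
  | nil =>
    simp [PySem.List.max?_id_cons, hnil]
    omega
  | cons h t =>
    rw [List.cons_append, PySem.List.max?_id_cons, PySem.List.max?_id_cons,
      List.foldl_append]
    simp

theorem pvLisStep_eq (a : List Int) (v : Int) :
    pvLisStep a v = if pvBisectRight a v = a.length then a ++ [v] else a.set (pvBisectRight a v) v := rfl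

-- ---------- main invariant: patience tails vs the DP table ----------
theorem pvMain (p : List Int) :
    (List.foldl pvLisStep [] p).Pairwise (· ≤ ·) ∧
    (∀ d ∈ (pvDpState p).2, 1 ≤ d) ∧
    (∀ v : Int, (((List.foldl pvLisStep [] p).countP (fun x => decide (x ≤ v))) : Int)
        = pvBest p (pvDpState p).2 v) ∧
    (((List.foldl pvLisStep [] p).length : Int)
        = (PySem.List.max? (pvDpState p).2 (fun y => y)).getD 0) := by
  induction p using List.reverseRecOn with
  | nil =>
    have hnil : PySem.List.max? ([] : List Int) (fun y => y) = none := by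
      rw [PySem.List.max?_eq_none_iff]
    refine ⟨List.Pairwise.nil, by simp [pvDpState], ?_, by simp [pvDpState, hnil]⟩
    intro v
    simp [pvBest, pvDpState]
  | append_singleton p w ih =>
    obtain ⟨hsort, hpos, hcount, hlen⟩ := ih
    set a := List.foldl pvLisStep [] p with ha
    set dp := (pvDpState p).2 with hdp
    have hdplen : dp.length = p.length := (pvDpState_fst p).2
    set m := pvBest p dp w with hm
    -- new tails and new dp
    have hA : List.foldl pvLisStep [] (p ++ [w]) = pvLisStep a w := by
      rw [List.foldl_append]; rfl
    have hD : (pvDpState (p ++ [w])).2 = dp ++ [m + 1] := by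
      rw [pvDpState_snoc]
      unfold pvDpStep
      rw [(pvDpState_fst p).1]
    -- new pvBest as one step
    have hBnew : ∀ v : Int, pvBest (p ++ [w]) (dp ++ [m + 1]) v
        = (if w ≤ v ∧ pvBest p dp v < m + 1 then m + 1 else pvBest p dp v) := by
      intro v
      unfold pvBest
      rw [List.zip_append hdplen.symm, List.foldl_append]
      rfl
    -- decompose a at the ≤ w prefix
    set t := a.takeWhile (fun x => decide (x ≤ w)) with hT
    set r := a.dropWhile (fun x => decide (x ≤ w)) with hR
    have htr : t ++ r = a := List.takeWhile_append_dropWhile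
    have hmt : m = (t.length : Int) := by
      rw [hm, ← hcount w, pvCountP_takeWhile a w hsort]
    have hposw : pvBisectRight a w = t.length := pvBisectRight_eq a w hsort
    have htle : ∀ x ∈ t, x ≤ w := by
      intro x hx
      simpa using List.mem_takeWhile_imp hx
    have hrgt : ∀ x ∈ r, w < x := by
      have hcnt : a.countP (fun x => decide (x ≤ w)) = t.length := pvCountP_takeWhile a w hsort
      rw [← htr, List.countP_append] at hcnt
      have hct : t.countP (fun x => decide (x ≤ w)) = t.length := by
        rw [List.countP_eq_length]
        intro x hx
        simpa using htle x hx
      have hcr : r.countP (fun x => decide (x ≤ w)) = 0 := by omega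
      rw [List.countP_eq_zero] at hcr
      intro x hx
      have := hcr x hx
      simp only [decide_eq_true_eq] at this
      omega
    have hsortr : r.Pairwise (· ≤ ·) := by
      rw [← htr] at hsort
      exact (List.pairwise_append.1 hsort).2.1
    have hsortt : t.Pairwise (· ≤ ·) := by
      rw [← htr] at hsort
      exact (List.pairwise_append.1 hsort).1
    clear_value t r
    clear hT hR
    refine ⟨?_, ?_, ?_, ?_⟩
    -- in each part we branch on whether r is empty (append) or not (set)
    · -- sortedness
      rw [hA]
      rw [pvLisStep_eq, hposw]
      cases r with
      | nil =>
        rw [List.append_nil] at htr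
        rw [if_pos (by rw [← htr])]
        rw [← htr]
        rw [List.pairwise_append]
        refine ⟨hsortt, by simp, ?_⟩
        intro x hx y hy
        simp only [List.mem_singleton] at hy
        subst hy
        exact htle x hx
      | cons rh rt =>
        have hlt : t.length < a.length := by
          rw [← htr]; simp
        rw [if_neg (by omega)]
        have hset : a.set t.length w = t ++ w :: rt := by
          rw [← htr, List.set_append_right _ _ (le_refl _)]
          simp
        rw [hset]
        rw [← htr] at hsort
        have hpr := List.pairwise_append.1 hsort
        have hrr := List.pairwise_cons.1 hpr.2.1
        rw [List.pairwise_append]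
        refine ⟨hsortt, ?_, ?_⟩
        · rw [List.pairwise_cons]
          refine ⟨?_, hrr.2⟩
          intro y hy
          have h1 := hrgt rh (by simp)
          have h2 := hrr.1 y hy
          omega
        · intro x hx y hy
          have hxw := htle x hx
          rcases List.mem_cons.1 hy with rfl | hy'
          · exact hxw
          · have h1 := hrgt rh (by simp)
            have h2 := hrr.1 y hy'
            omega
    · -- dp entries ≥ 1
      rw [hD]
      intro d hd
      rcases List.mem_append.1 hd with hd1 | hd2
      · exact hpos d hd1
      · simp only [List.mem_singleton] at hd2
        subst hd2
        have : (0 : Int) ≤ m := by rw [hmt]; positivity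
        omega
    · -- the count invariant
      intro v
      rw [hA, hD, hBnew v, ← hcount v]
      rw [pvLisStep_eq, hposw]
      cases r with
      | nil =>
        rw [List.append_nil] at htr
        subst htr
        rw [if_pos rfl]
        rw [List.countP_append, List.countP_cons, List.countP_nil]
        simp only [decide_eq_true_eq]
        by_cases hv : w ≤ v
        · have hct : a.countP (fun x => decide (x ≤ v)) = a.length := by
            rw [List.countP_eq_length]
            intro x hx
            simpa using le_trans (htle x hx) hv
          rw [if_pos hv, hct, if_pos ⟨hv, by omega⟩]
          omega
        · rw [if_neg hv, if_neg (fun hc => hv hc.1)]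
          omega
      | cons rh rt =>
        have hlt : t.length < a.length := by
          rw [← htr]; simp
        rw [if_neg (by omega)]
        have hset : a.set t.length w = t ++ w :: rt := by
          rw [← htr, List.set_append_right _ _ (le_refl _)]
          simp
        rw [hset, ← htr]
        rw [List.countP_append, List.countP_append, List.countP_cons, List.countP_cons]
        simp only [decide_eq_true_eq]
        by_cases hv : w ≤ v
        · have hct : t.countP (fun x => decide (x ≤ v)) = t.length := by
            rw [List.countP_eq_length]
            intro x hx
            simpa using le_trans (htle x hx) hv
          rw [if_pos hv]
          by_cases hrh : rh ≤ v
          · rw [if_pos hrh, hct]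
            split_ifs with hc
            · exfalso; omega
            · omega
          · have hrt0 : rt.countP (fun x => decide (x ≤ v)) = 0 := by
              rw [List.countP_eq_zero]
              intro y hy
              have := (List.pairwise_cons.1 hsortr).1 y hy
              simp only [decide_eq_true_eq]
              omega
            rw [if_neg hrh, hct, hrt0]
            split_ifs with hc
            · omega
            · exact absurd ⟨hv, by omega⟩ hc
        · have hrh : ¬ rh ≤ v := by
            have := hrgt rh (by simp)
            omega
          rw [if_neg hv, if_neg hrh, if_neg (fun hc => hv hc.1)]
    · -- the length invariant
      rw [hA, hD]
      have hm0 : (0 : Int) ≤ m := by rw [hmt]; positivity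
      rw [pvMaxD_append dp (m + 1) (by omega), ← hlen]
      rw [pvLisStep_eq, hposw]
      cases r with
      | nil =>
        rw [List.append_nil] at htr
        rw [if_pos (by rw [← htr])]
        have hm2 : m = (a.length : Int) := by rw [hmt, htr]
        simp only [List.length_append, List.length_cons, List.length_nil]
        omega
      | cons rh rt =>
        have hlt : t.length < a.length := by
          rw [← htr]; simp
        rw [if_neg (by omega)]
        rw [List.length_set]
        rw [hmt] at *
        omega

-- per-group: A's patience LIS length equals B's DP maximum
theorem pvGroupEq (g : List Int) :
    ((pvLIS g : Nat) : Int)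
      = (PySem.List.max? (g.foldl (fun dp v => dp ++ [pvBest g dp v + 1]) []) (fun y => y)).getD 0 := by
  rw [pvDpPort g]
  unfold pvLIS
  exact (pvMain g).2.2.2

-- ===== VERDICT (by name: the statement is the Claim_ definition above) =====
theorem kIncreasing_spec : Claim_equal_kIncreasing := by
  intro arr k _ hk
  unfold Spec_kIncreasing kIncreasing
  have hk' : (1 : Int) ≤ k := hk
  set K := k.toNat with hKdef
  have hK : 0 < K := by omega
  have hkK : ((K : Nat) : Int) = k := by omega
  -- A side: rewrite the fold to a sum over the stride groups
  have hcong : (PySem.List.pyRange 0 k 1).foldl (fun ans i =>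
      let group := (PySem.List.pyRange i (arr.length : Int) k).foldl
          (fun g x => g ++ [PySem.List.pyGetD arr x 0]) []
      ans + ((group.length : Int) - (pvLIS group : Int))) 0
      = (PySem.List.pyRange 0 k 1).foldl (fun ans i =>
      ans + (((pvGrp K i.toNat arr).length : Int) - ((pvLIS (pvGrp K i.toNat arr)) : Int))) 0 := by
    apply PySem.List.foldl_congr_mem
    intro acc i hi
    rw [PySem.List.mem_pyRange_one] at hi
    have hi0 : (i.toNat : Int) = i := by omega
    simp only []
    rw [PySem.List.foldl_append_singleton_eq_map, List.nil_append, ← hi0, pvG1 k hk' arr i.toNat]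
    simp only [Int.toNat_natCast, hKdef]
  rw [hcong]
  -- B side: the bucket pass builds exactly the stride groups
  have hlen0 : ((PySem.List.pyRange 0 k 1).map (fun _ => ([] : List Int))).length = K := by
    rw [List.length_map, PySem.List.length_pyRange_one]
    omega
  obtain ⟨hreslen, hres⟩ := pvG2 k hk' (fun a v => a ++ [v]) arr 0
    ((PySem.List.pyRange 0 k 1).map (fun _ => ([] : List Int))) hlen0
  set res := arr.foldl (fun (p : List (List Int) × Nat) v =>
      let j := (PySem.Int.mod (p.2 : Int) k).toNat
      (p.1.set j (p.1.getD j [] ++ [v]), p.2 + 1))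
      (((PySem.List.pyRange 0 k 1).map (fun _ => ([] : List Int))), 0) with hresdef
  have hBdef : kIncreasing_alt arr k = res.1.foldl (fun ans g =>
      ans + ((g.length : Int)
        - (PySem.List.max? (g.foldl (fun dp v => dp ++ [pvBest g dp v + 1]) ([] : List Int)) (fun y => y)).getD 0)) 0 := rfl
  rw [hBdef]
  have hres1 : res.1 = (List.range K).map (fun d => pvGrp K d arr) := by
    apply List.ext_getElem
    · rw [hreslen, List.length_map, List.length_range]
    · intro i h1 h2
      have hiK : i < K := by rwa [hreslen] at h1
      have := hres i hiK
      rw [Nat.zero_add, Nat.mod_eq_of_lt hiK, pvMapConstGetD] at this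
      rw [List.getD_eq_getElem?_getD, List.getElem?_eq_getElem h1] at this
      rw [List.getElem_map, List.getElem_range]
      rw [PySem.List.foldl_append_singleton_eq_map (fun x => x) (pvGrp K i arr) []] at this
      simpa using this
  rw [hres1]
  -- both sides are now folds over the same group list; compare summand by summand
  rw [PySem.List.foldl_add ((List.range K).map (fun d => pvGrp K d arr))
      (fun g => (g.length : Int) - (PySem.List.max? (g.foldl (fun dp v => dp ++ [pvBest g dp v + 1]) []) (fun y => y)).getD 0) 0,
    PySem.List.foldl_add (PySem.List.pyRange 0 k 1)
      (fun i => ((pvGrp K i.toNat arr).length : Int) - ((pvLIS (pvGrp K i.toNat arr)) : Int)) 0,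
    ← hkK, PySem.List.pyRange_zero_natCast, List.map_map, List.map_map]
  simp only [zero_add]
  refine congrArg (fun l : List Int => l.sum) (List.map_congr_left ?_)
  intro d _
  simp only [Function.comp, Int.toNat_natCast]
  rw [pvGroupEq (pvGrp K d arr)]
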